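-- pv_equiv track=rewrite | github.com/pritalb/Python | lattice_paths.py | node_path_dict_top_half
-- ===== SOURCE A (Python) =====
-- def get_adjacent_node_top_half(grid_size, node):
--     i = node[0] # row
--     j = node[1] # column
--
--     if i + j >= grid_size:
--         return None
--
--     node_right = (i, j + 1)
--     node_below = (i + 1, j)
--     return [node_below, node_right]
--
-- def node_path_dict_top_half(grid_top_half, grid_size):
--     path_dict = {
--         (0, 0) : [ [(0, 0)], ],
--     }
--
--     nodes_in_grid_top = []
--     for row in grid_top_half:
--         for node in row:
--             nodes_in_grid_top.append(node)
--
--     for node in nodes_in_grid_top: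
--         adjacent_nodes = get_adjacent_node_top_half(grid_size, node)
--
--         if not adjacent_nodes:
--             continue
--
--         for adjacent_node in adjacent_nodes:
--             path_upto_current_node = path_dict[node][0] + [adjacent_node]
--
--             if adjacent_node in path_dict.keys():
--                 paths_upto_now = path_dict[adjacent_node] # does not include current node
--
--                 # for path in paths_upto_now:
--                 path_dict[adjacent_node].append(path_upto_current_node)
--             else:
--                 path_dict[adjacent_node] = [path_upto_current_node]
--     return path_dict
-- ===== SOURCE B (Python) =====
-- def node_path_dict_top_half(grid_top_half, grid_size):
--     # Phase 1: one representative path per reachable node (the first path that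
--     # reaches it, extending the above/left predecessor that was processed first).
--     first = {(0, 0): [(0, 0)]}
--     for row in grid_top_half:
--         for i, j in row:
--             if i + j < grid_size:
--                 base = first[(i, j)]
--                 for succ in ((i + 1, j), (i, j + 1)):
--                     first.setdefault(succ, base + [succ])
--
--     # Phase 2: collect, per node, every path obtained by extending a
--     # representative path by one step.
--     paths = {(0, 0): [[(0, 0)]]}
--     for row in grid_top_half:
--         for i, j in row:
--             if i + j < grid_size:
--                 base = first[(i, j)]
--                 for succ in ((i + 1, j), (i, j + 1)):
--                     paths.setdefault(succ, []).append(base + [succ])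
--     return paths
-- ===== Notes on version B (the rewrite author's own statement) =====
-- stated objective: alternative
-- what changed: A interleaves everything in one push loop whose dict doubles as its own memo (reading path_dict[node][0] to extend successors); B splits the job into two passes: a first pass memoizes one representative path per reachable node, then an independent second pass assembles every node's path list from those representatives.
import Mathlib
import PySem

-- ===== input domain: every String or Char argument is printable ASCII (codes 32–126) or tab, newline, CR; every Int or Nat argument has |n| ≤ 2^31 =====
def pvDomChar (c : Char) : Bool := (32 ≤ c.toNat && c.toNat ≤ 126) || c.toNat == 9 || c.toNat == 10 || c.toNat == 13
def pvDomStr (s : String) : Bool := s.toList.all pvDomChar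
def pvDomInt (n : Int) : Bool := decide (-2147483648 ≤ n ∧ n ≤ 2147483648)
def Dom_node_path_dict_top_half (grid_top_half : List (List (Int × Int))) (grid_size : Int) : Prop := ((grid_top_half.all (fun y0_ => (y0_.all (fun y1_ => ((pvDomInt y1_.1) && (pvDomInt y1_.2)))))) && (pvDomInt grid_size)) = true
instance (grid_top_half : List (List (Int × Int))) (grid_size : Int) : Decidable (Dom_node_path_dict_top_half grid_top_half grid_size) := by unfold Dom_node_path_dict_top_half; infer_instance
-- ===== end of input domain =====

-- B replaces A's single dict-threaded push loop with two separate passes: a first pass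
-- that memoizes one representative path per reachable node, then a pass that assembles
-- each node's path list from those representatives (objective: alternative decomposition).


-- ===== PORT A =====
def get_adjacent_node_top_half (grid_size : Int) (node : Int × Int) :
    Option (List (Int × Int)) :=
  let i := node.1
  let j := node.2
  if i + j ≥ grid_size then none
  else
    let node_right := (i, j + 1)
    let node_below := (i + 1, j)
    some [node_below, node_right]

-- one iteration of A's inner `for adjacent_node …` loop; none = KeyError/IndexError raised
def pvAddAdjA (d : PySem.Dict (Int × Int) (List (List (Int × Int))))
    (node adj : Int × Int) : Option (PySem.Dict (Int × Int) (List (List (Int × Int)))) :=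
  match d.get? node with
  | none => none                       -- KeyError: path_dict[node]
  | some ps =>
    match ps.head? with
    | none => none                     -- IndexError: …[0]
    | some p0 =>
      let path_upto_current_node := p0 ++ [adj]
      if d.contains adj then
        some (d.modify adj [] (fun v => v ++ [path_upto_current_node]))
      else
        some (d.insert adj [path_upto_current_node])

-- one iteration of A's outer `for node in nodes_in_grid_top` loop
def pvStepA (grid_size : Int)
    (od : Option (PySem.Dict (Int × Int) (List (List (Int × Int)))))
    (node : Int × Int) : Option (PySem.Dict (Int × Int) (List (List (Int × Int)))) :=
  od.bind fun d =>
    match get_adjacent_node_top_half grid_size node with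
    | none => some d
    | some adjacent_nodes =>
      adjacent_nodes.foldl (fun od adj => od.bind fun d => pvAddAdjA d node adj) (some d)

def node_path_dict_top_half (grid_top_half : List (List (Int × Int))) (grid_size : Int) :
    List (Int × Int × List (List (Int × Int))) :=
  let path_dict0 : PySem.Dict (Int × Int) (List (List (Int × Int))) :=
    PySem.Dict.empty.insert ((0 : Int), (0 : Int)) [[((0 : Int), (0 : Int))]]
  let nodes_in_grid_top :=
    grid_top_half.foldl (fun acc row => row.foldl (fun a n => a ++ [n]) acc) []
  match nodes_in_grid_top.foldl (pvStepA grid_size) (some path_dict0) with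
  | some d => d.items.map (fun p => (p.1.1, p.1.2, p.2))
  | none => []                         -- Python raised here: excluded by Pre_

-- ===== PORT B =====
-- Python's dict.setdefault(s, v): insert only if the key is absent (exact)
def pvSetD {ν : Type} (f : PySem.Dict (Int × Int) ν) (s : Int × Int) (v : ν) :
    PySem.Dict (Int × Int) ν :=
  if f.contains s then f else f.insert s v

-- one node of Source B's phase-1 loop; none = KeyError first[(i, j)]
def pvFirstStep (grid_size : Int)
    (of : Option (PySem.Dict (Int × Int) (List (Int × Int))))
    (node : Int × Int) : Option (PySem.Dict (Int × Int) (List (Int × Int))) :=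
  of.bind fun f =>
    if node.1 + node.2 < grid_size then
      match f.get? node with
      | none => none                   -- KeyError: first[(i, j)]
      | some base =>
        some ([(node.1 + 1, node.2), (node.1, node.2 + 1)].foldl
          (fun f succ => pvSetD f succ (base ++ [succ])) f)
    else some f

-- paths.setdefault(succ, []).append(path)
def pvPutB (d : PySem.Dict (Int × Int) (List (List (Int × Int))))
    (succ : Int × Int) (path : List (Int × Int)) :
    PySem.Dict (Int × Int) (List (List (Int × Int))) :=
  if d.contains succ then d.modify succ [] (fun v => v ++ [path])
  else d.insert succ [path]

-- one node of Source B's phase-2 loop (first[(i, j)] is always present once phase 1 returned,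
-- so getD is exact here)
def pvOutStep (first : PySem.Dict (Int × Int) (List (Int × Int))) (grid_size : Int)
    (d : PySem.Dict (Int × Int) (List (List (Int × Int))))
    (node : Int × Int) : PySem.Dict (Int × Int) (List (List (Int × Int))) :=
  if node.1 + node.2 < grid_size then
    let base := first.getD node []
    [(node.1 + 1, node.2), (node.1, node.2 + 1)].foldl
      (fun d succ => pvPutB d succ (base ++ [succ])) d
  else d

def node_path_dict_top_half_alt (grid_top_half : List (List (Int × Int))) (grid_size : Int) :
    List (Int × Int × List (List (Int × Int))) :=
  let first0 : PySem.Dict (Int × Int) (List (Int × Int)) :=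
    PySem.Dict.empty.insert ((0 : Int), (0 : Int)) [((0 : Int), (0 : Int))]
  match grid_top_half.foldl (fun of row => row.foldl (pvFirstStep grid_size) of) (some first0) with
  | none => []                         -- Python raised KeyError in phase 1: excluded by Pre_
  | some first =>
    let paths0 : PySem.Dict (Int × Int) (List (List (Int × Int))) :=
      PySem.Dict.empty.insert ((0 : Int), (0 : Int)) [[((0 : Int), (0 : Int))]]
    ((grid_top_half.foldl (fun d row => row.foldl (pvOutStep first grid_size) d) paths0).items.map
      (fun p => (p.1.1, p.1.2, p.2)))

-- ===== PRECONDITION & SPEC =====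
-- Pre_ excludes exactly the inputs on which A raises KeyError: a node with i+j < grid_size
-- that is neither (0,0) nor preceded (in the flattened grid) by a qualifying above/left
-- predecessor is looked up before it was ever inserted.
def Pre_node_path_dict_top_half (grid_top_half : List (List (Int × Int))) (grid_size : Int) : Prop :=
  let ns := grid_top_half.flatten
  ∀ k, k < ns.length → (ns.getD k (0, 0)).1 + (ns.getD k (0, 0)).2 < grid_size →
    ns.getD k (0, 0) = (0, 0) ∨
    ∃ m, m < k ∧ (ns.getD m (0, 0)).1 + (ns.getD m (0, 0)).2 < grid_size ∧
      (ns.getD m (0, 0) = ((ns.getD k (0, 0)).1 - 1, (ns.getD k (0, 0)).2) ∨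
       ns.getD m (0, 0) = ((ns.getD k (0, 0)).1, (ns.getD k (0, 0)).2 - 1))

instance (grid_top_half : List (List (Int × Int))) (grid_size : Int) :
    Decidable (Pre_node_path_dict_top_half grid_top_half grid_size) := by
  unfold Pre_node_path_dict_top_half; infer_instance

def pvWitness_node_path_dict_top_half : (List (List (Int × Int))) × Int :=
  ([[((0 : Int), (0 : Int)), ((0 : Int), (1 : Int))], [((1 : Int), (0 : Int)), ((1 : Int), (1 : Int))]], 2)

def Spec_node_path_dict_top_half (grid_top_half : List (List (Int × Int))) (grid_size : Int) (out : List (Int × Int × List (List (Int × Int)))) : Prop := out = node_path_dict_top_half_alt grid_top_half grid_size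
instance (grid_top_half : List (List (Int × Int))) (grid_size : Int) (out : List (Int × Int × List (List (Int × Int)))) : Decidable (Spec_node_path_dict_top_half grid_top_half grid_size out) := by unfold Spec_node_path_dict_top_half; infer_instance

-- ===== CLAIM (what is proved, stated in full; the proofs are below) =====
def Claim_equal_node_path_dict_top_half : Prop := ∀ (grid_top_half : List (List (Int × Int))) (grid_size : Int), Dom_node_path_dict_top_half grid_top_half grid_size → Pre_node_path_dict_top_half grid_top_half grid_size → Spec_node_path_dict_top_half grid_top_half grid_size (node_path_dict_top_half grid_top_half grid_size)

-- ===== LEMMAS AND PROOFS =====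

-- a node already created while processing the prefix l (a key of either dict at that point)
def pvCreated (grid_size : Int) (l : List (Int × Int)) (x : Int × Int) : Prop :=
  x = (0, 0) ∨ ∃ p ∈ l, p.1 + p.2 < grid_size ∧ (x = (p.1 + 1, p.2) ∨ x = (p.1, p.2 + 1))

-- invariant of B's phase-1 dict after a prefix l
def pvGoodF (grid_size : Int) (l : List (Int × Int))
    (f : PySem.Dict (Int × Int) (List (Int × Int))) : Prop :=
  ∀ x, f.contains x = true ↔ pvCreated grid_size l x

lemma pvSetD_contains {ν : Type} (f : PySem.Dict (Int × Int) ν) (s : Int × Int) (v : ν)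
    (x : Int × Int) : (pvSetD f s v).contains x = (x == s || f.contains x) := by
  by_cases hc : f.contains s = true
  · rw [pvSetD, if_pos hc]
    by_cases hx : x = s
    · subst hx
      simp [hc]
    · simp [hx]
  · rw [pvSetD, if_neg hc, PySem.Dict.contains_insert]

lemma pvSetD_getD {ν : Type} (f : PySem.Dict (Int × Int) ν) (s : Int × Int) (v d : ν)
    (x : Int × Int) :
    (pvSetD f s v).getD x d =
      if x = s then (if f.contains s then f.getD s d else v) else f.getD x d := by
  rw [pvSetD]
  split
  · rename_i hc
    by_cases hx : x = s
    · subst hx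
      rw [if_pos rfl]
    · rw [if_neg hx]
  · rw [PySem.Dict.getD_insert]

lemma pvPutB_contains (d : PySem.Dict (Int × Int) (List (List (Int × Int))))
    (s : Int × Int) (pa : List (Int × Int)) (x : Int × Int) :
    (pvPutB d s pa).contains x = (x == s || d.contains x) := by
  rw [pvPutB]
  split
  · rw [PySem.Dict.contains_modify]
  · rw [PySem.Dict.contains_insert]

lemma pvPutB_getD (d : PySem.Dict (Int × Int) (List (List (Int × Int))))
    (s : Int × Int) (pa : List (Int × Int)) (x : Int × Int) :
    (pvPutB d s pa).getD x [] = if x = s then d.getD s [] ++ [pa] else d.getD x [] := by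
  rw [pvPutB]
  split
  · rw [PySem.Dict.getD_modify]
  · rename_i hc
    rw [PySem.Dict.getD_insert]
    split_ifs
    · rw [PySem.Dict.getD_of_not_contains d [] (by simpa using hc)]
      simp
    · rfl

-- the Pre_ condition, read at a list split
lemma pvPre_split (ght : List (List (Int × Int))) (gs : Int)
    (hpre : Pre_node_path_dict_top_half ght gs)
    (l r : List (Int × Int)) (n : Int × Int) (hsplit : ght.flatten = l ++ n :: r)
    (hq : n.1 + n.2 < gs) : pvCreated gs l n := by
  have hpre' := hpre
  simp only [Pre_node_path_dict_top_half] at hpre'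
  have hk : l.length < ght.flatten.length := by rw [hsplit]; simp
  have hgetk : ght.flatten.getD l.length (0, 0) = n := by
    rw [hsplit, List.getD_eq_getElem?_getD, List.getElem?_append_right (Nat.le_refl _)]
    simp
  have h := hpre' l.length hk (by rw [hgetk]; exact hq)
  rw [hgetk] at h
  rcases h with h0 | ⟨m, hm, hqm, hpm⟩
  · left; exact h0
  · right
    have hml : m < l.length := by omega
    have hgetm : ght.flatten.getD m (0, 0) = l[m] := by
      rw [hsplit, List.getD_eq_getElem?_getD, List.getElem?_append_left hml,
          List.getElem?_eq_getElem hml]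
      rfl
    rw [hgetm] at hqm hpm
    refine ⟨l[m], List.getElem_mem hml, hqm, ?_⟩
    rcases hpm with h | h
    · left
      rw [Prod.ext_iff] at h ⊢
      obtain ⟨h1, h2⟩ := h
      exact ⟨by omega, by omega⟩
    · right
      rw [Prod.ext_iff] at h ⊢
      obtain ⟨h1, h2⟩ := h
      exact ⟨by omega, by omega⟩

lemma pvGet?_of_contains {ν : Type} [Inhabited ν] (d : PySem.Dict (Int × Int) ν)
    (x : Int × Int) (h : d.contains x = true) : d.get? x = some (d.getD x default) := by
  cases hc : d.get? x with
  | none =>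
    rw [PySem.Dict.contains_eq_isSome_get?, hc] at h
    simp at h
  | some v =>
    rw [PySem.Dict.getD_eq_get?_getD, hc]
    rfl

lemma pvHead_append {α : Type} (v u : List α) (w : α) (h : v.head? = some w) :
    (v ++ u).head? = some w := by
  cases v <;> simp_all

lemma pvCreated_append (gs : Int) (l : List (Int × Int)) (n x : Int × Int) :
    pvCreated gs (l ++ [n]) x ↔
      pvCreated gs l x ∨
        (n.1 + n.2 < gs ∧ (x = (n.1 + 1, n.2) ∨ x = (n.1, n.2 + 1))) := by
  simp only [pvCreated, List.mem_append, List.mem_singleton]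
  constructor
  · rintro (h0 | ⟨p, (hp | rfl), hq, hd⟩)
    · exact Or.inl (Or.inl h0)
    · exact Or.inl (Or.inr ⟨p, hp, hq, hd⟩)
    · exact Or.inr ⟨hq, hd⟩
  · rintro ((h0 | ⟨p, hp, hq, hd⟩) | ⟨hq, hd⟩)
    · exact Or.inl h0
    · exact Or.inr ⟨p, Or.inl hp, hq, hd⟩
    · exact Or.inr ⟨n, Or.inr rfl, hq, hd⟩

-- phase 1 never raises under Pre_, ends with the full creation set, and is stable:
-- a key present after prefix l keeps its value to the end
lemma pvRun1 (ght : List (List (Int × Int))) (gs : Int)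
    (hpre : Pre_node_path_dict_top_half ght gs) :
    ∀ (r l : List (Int × Int)) (f : PySem.Dict (Int × Int) (List (Int × Int))),
      ght.flatten = l ++ r → pvGoodF gs l f →
      ∃ F, r.foldl (pvFirstStep gs) (some f) = some F ∧ pvGoodF gs ght.flatten F ∧
        (∀ x, f.contains x = true → F.contains x = true ∧ F.getD x [] = f.getD x []) := by
  intro r
  induction r with
  | nil =>
    intro l f hsplit hg
    refine ⟨f, by simp, ?_, fun x hx => ⟨hx, rfl⟩⟩
    rw [hsplit] at *
    simpa using hg
  | cons n r ih =>
    intro l f hsplit hg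
    by_cases hq : n.1 + n.2 < gs
    · have hcr : pvCreated gs l n := pvPre_split ght gs hpre l r n hsplit hq
      have hcf : f.contains n = true := (hg n).2 hcr
      set base := f.getD n [] with hbase
      set bl : Int × Int := (n.1 + 1, n.2) with hbl
      set rt : Int × Int := (n.1, n.2 + 1) with hrt
      have hrtbl : rt ≠ bl := by
        rw [hbl, hrt]; intro h; rw [Prod.ext_iff] at h; simp at h
      set f1 := pvSetD f bl (base ++ [bl]) with hf1
      set f2 := pvSetD f1 rt (base ++ [rt]) with hf2
      have hstep : pvFirstStep gs (some f) n = some f2 := by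
        simp only [pvFirstStep, Option.bind_some, if_pos hq,
          pvGet?_of_contains f n hcf]
        simp only [List.foldl_cons, List.foldl_nil]
        rfl
      have hc2 : ∀ x, f2.contains x = (x == rt || (x == bl || f.contains x)) := by
        intro x
        rw [hf2, pvSetD_contains, hf1, pvSetD_contains]
      have hg2 : pvGoodF gs (l ++ [n]) f2 := by
        intro x
        rw [hc2 x, pvCreated_append]
        constructor
        · intro h
          simp only [Bool.or_eq_true, beq_iff_eq] at h
          rcases h with h1 | h1 | h1
          · exact Or.inr ⟨hq, Or.inr (by rw [h1, hrt])⟩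
          · exact Or.inr ⟨hq, Or.inl (by rw [h1, hbl])⟩
          · exact Or.inl ((hg x).1 h1)
        · intro h
          simp only [Bool.or_eq_true, beq_iff_eq]
          rcases h with h | ⟨_, rfl | rfl⟩
          · exact Or.inr (Or.inr ((hg x).2 h))
          · exact Or.inr (Or.inl hbl.symm)
          · exact Or.inl hrt.symm
      obtain ⟨F, hF, hGF, hstab⟩ := ih (l ++ [n]) f2 (by rw [hsplit]; simp) hg2
      refine ⟨F, ?_, hGF, ?_⟩
      · simp only [List.foldl_cons, hstep, hF]
      · intro x hx
        have hx2 : f2.contains x = true := by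
          rw [hc2 x, hx]; simp
        have hv2 : f2.getD x [] = f.getD x [] := by
          simp only [hf2, hf1, pvSetD_getD, pvSetD_contains]
          by_cases hxrt : x = rt
          · subst hxrt
            rw [if_pos rfl, if_pos (show (rt == bl || f.contains rt) = true by
              rw [hx]; simp), if_neg hrtbl]
          · rw [if_neg hxrt]
            by_cases hxbl : x = bl
            · subst hxbl
              rw [if_pos rfl, if_pos hx]
            · rw [if_neg hxbl]
        obtain ⟨ha, hb⟩ := hstab x hx2
        exact ⟨ha, by rw [hb, hv2]⟩
    · have hstep : pvFirstStep gs (some f) n = some f := by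
        simp [pvFirstStep, hq]
      have hg' : pvGoodF gs (l ++ [n]) f := by
        intro x
        rw [hg x, pvCreated_append]
        constructor
        · exact Or.inl
        · rintro (h | ⟨hqn, _⟩)
          · exact h
          · omega
      obtain ⟨F, hF, hGF, hstab⟩ := ih (l ++ [n]) f (by rw [hsplit]; simp) hg'
      exact ⟨F, by simp only [List.foldl_cons, hstep, hF], hGF, hstab⟩

-- invariant tying A's dict to phase-1 state f and the final first-map FF
def pvInvD (FF : PySem.Dict (Int × Int) (List (Int × Int)))
    (f : PySem.Dict (Int × Int) (List (Int × Int)))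
    (d : PySem.Dict (Int × Int) (List (List (Int × Int)))) : Prop :=
  (∀ x, d.contains x = f.contains x) ∧
  (∀ x, d.contains x = true → (d.getD x []).head? = some (FF.getD x []))

lemma pvAddAdjA_eq (d : PySem.Dict (Int × Int) (List (List (Int × Int))))
    (n adj : Int × Int) (b0 : List (Int × Int)) (hc : d.contains n = true)
    (hhead : (d.getD n []).head? = some b0) :
    pvAddAdjA d n adj = some (pvPutB d adj (b0 ++ [adj])) := by
  simp only [pvAddAdjA, pvGet?_of_contains d n hc]
  simp only [default] at *
  simp only [hhead, pvPutB]
  split <;> rfl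

-- A's fold over the remaining nodes equals B's phase-2 fold with the final first-map FF
lemma pvLock (ght : List (List (Int × Int))) (gs : Int)
    (hpre : Pre_node_path_dict_top_half ght gs)
    (FF : PySem.Dict (Int × Int) (List (Int × Int)))
    (f0 : PySem.Dict (Int × Int) (List (Int × Int))) :
    ∀ (r l : List (Int × Int)) (f : PySem.Dict (Int × Int) (List (Int × Int)))
      (d : PySem.Dict (Int × Int) (List (List (Int × Int)))),
      ght.flatten = l ++ r →
      l.foldl (pvFirstStep gs) (some f0) = some f →
      ght.flatten.foldl (pvFirstStep gs) (some f0) = some FF →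
      pvGoodF gs l f → pvInvD FF f d →
      r.foldl (pvStepA gs) (some d) = some (r.foldl (pvOutStep FF gs) d) := by
  intro r
  induction r with
  | nil => intro l f d _ _ _ _ _; simp
  | cons n r ih =>
    intro l f d hsplit hfold hFF hg hinv
    obtain ⟨hceq, hhead⟩ := hinv
    -- stability from f to FF
    have hstabf : ∀ x, f.contains x = true → FF.getD x [] = f.getD x [] := by
      intro x hx
      obtain ⟨F, hF, _, hstab⟩ := pvRun1 ght gs hpre (n :: r) l f hsplit hg
      have : F = FF := by
        have h1 : ght.flatten.foldl (pvFirstStep gs) (some f0)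
            = (n :: r).foldl (pvFirstStep gs) (some f) := by
          rw [hsplit, List.foldl_append, hfold]
        rw [h1, hF] at hFF
        exact Option.some.inj hFF
      rw [← this]
      exact (hstab x hx).2
    by_cases hq : n.1 + n.2 < gs
    · have hcr : pvCreated gs l n := pvPre_split ght gs hpre l r n hsplit hq
      have hcf : f.contains n = true := (hg n).2 hcr
      have hcd : d.contains n = true := by rw [hceq n]; exact hcf
      have hheadn : (d.getD n []).head? = some (FF.getD n []) := hhead n hcd
      set base := FF.getD n [] with hbaseFF
      set bl : Int × Int := (n.1 + 1, n.2) with hbl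
      set rt : Int × Int := (n.1, n.2 + 1) with hrt
      have hrtbl : rt ≠ bl := by
        rw [hbl, hrt]; intro h; rw [Prod.ext_iff] at h; simp at h
      -- one A-step = one B-phase-2-step
      set d1 := pvPutB d bl (base ++ [bl]) with hd1
      set d2 := pvPutB d1 rt (base ++ [rt]) with hd2
      have hq' : ¬ (n.1 + n.2 ≥ gs) := not_le.mpr hq
      have hc1 : d1.contains n = true := by rw [hd1, pvPutB_contains]; simp [hcd]
      have hnbl : n ≠ bl := by
        rw [hbl]; intro h; rw [Prod.ext_iff] at h; simp at h
      have hg1 : d1.getD n [] = d.getD n [] := by rw [hd1, pvPutB_getD, if_neg hnbl]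
      have hA : pvStepA gs (some d) n = some d2 := by
        simp only [pvStepA, Option.bind_some, get_adjacent_node_top_half,
          if_neg hq', List.foldl_cons, List.foldl_nil]
        rw [pvAddAdjA_eq d n bl base hcd hheadn, Option.bind_some,
          pvAddAdjA_eq d1 n rt base hc1 (by rw [hg1]; exact hheadn)]
      have hB : pvOutStep FF gs d n = d2 := by
        simp only [pvOutStep, if_pos hq, List.foldl_cons, List.foldl_nil]
        rw [hd2, hd1, hbl, hrt, hbaseFF]
      -- phase-1 state after this node
      set fbase := f.getD n [] with hfbase
      set f1 := pvSetD f bl (fbase ++ [bl]) with hf1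
      set f2 := pvSetD f1 rt (fbase ++ [rt]) with hf2
      have hstep1 : pvFirstStep gs (some f) n = some f2 := by
        simp only [pvFirstStep, Option.bind_some, if_pos hq,
          pvGet?_of_contains f n hcf]
        simp only [default] at *
        simp only [List.foldl_cons, List.foldl_nil]
        rfl
      have hfold' : (l ++ [n]).foldl (pvFirstStep gs) (some f0) = some f2 := by
        rw [List.foldl_append, hfold]
        simpa using hstep1
      have hc2f : ∀ x, f2.contains x = (x == rt || (x == bl || f.contains x)) := by
        intro x
        rw [hf2, pvSetD_contains, hf1, pvSetD_contains]
      have hg2 : pvGoodF gs (l ++ [n]) f2 := by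
        intro x
        rw [hc2f x, pvCreated_append]
        constructor
        · intro h
          simp only [Bool.or_eq_true, beq_iff_eq] at h
          rcases h with h1 | h1 | h1
          · exact Or.inr ⟨hq, Or.inr (by rw [h1, hrt])⟩
          · exact Or.inr ⟨hq, Or.inl (by rw [h1, hbl])⟩
          · exact Or.inl ((hg x).1 h1)
        · intro h
          simp only [Bool.or_eq_true, beq_iff_eq]
          rcases h with h | ⟨_, rfl | rfl⟩
          · exact Or.inr (Or.inr ((hg x).2 h))
          · exact Or.inr (Or.inl hbl.symm)
          · exact Or.inl hrt.symm
      -- stability from f2 to FF (used to read off FF at freshly created keys)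
      have hstabf2 : ∀ x, f2.contains x = true → FF.getD x [] = f2.getD x [] := by
        intro x hx
        obtain ⟨F, hF, _, hstab⟩ := pvRun1 ght gs hpre r (l ++ [n]) f2
          (by rw [hsplit]; simp) hg2
        have : F = FF := by
          have h1 : ght.flatten.foldl (pvFirstStep gs) (some f0)
              = r.foldl (pvFirstStep gs) (some f2) := by
            rw [hsplit, show l ++ n :: r = (l ++ [n]) ++ r by simp,
              List.foldl_append, hfold']
          rw [h1, hF] at hFF
          exact Option.some.inj hFF
        rw [← this]
        exact (hstab x hx).2
      have hbase_eq : fbase = base := by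
        rw [hfbase, hbaseFF, hstabf n hcf]
      -- the invariant after this node
      have hc2d : ∀ x, d2.contains x = (x == rt || (x == bl || d.contains x)) := by
        intro x
        rw [hd2, pvPutB_contains, hd1, pvPutB_contains]
      have hinv2 : pvInvD FF f2 d2 := by
        constructor
        · intro x
          rw [hc2d x, hc2f x, hceq x]
        · intro x hx
          rw [hd2, pvPutB_getD]
          by_cases hxrt : x = rt
          · subst hxrt
            rw [if_pos rfl, hd1, pvPutB_getD, if_neg hrtbl]
            by_cases hcx : d.contains rt = true
            · exact pvHead_append _ _ _ (hhead rt hcx)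
            · have hfx : f.contains rt = false := by rw [← hceq rt]; simpa using hcx
              rw [PySem.Dict.getD_of_not_contains d [] (by simpa using hcx)]
              have hFFrt : FF.getD rt [] = base ++ [rt] := by
                rw [hstabf2 rt (by rw [hc2f rt]; simp), hf2, pvSetD_getD, if_pos rfl,
                  if_neg (by rw [hf1, pvSetD_contains, hfx]; simp [hrtbl]), hbase_eq]
              rw [hFFrt]
              rfl
          · rw [if_neg hxrt]
            by_cases hxbl : x = bl
            · subst hxbl
              rw [hd1, pvPutB_getD, if_pos rfl]
              by_cases hcx : d.contains bl = true
              · exact pvHead_append _ _ _ (hhead bl hcx)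
              · have hfx : f.contains bl = false := by rw [← hceq bl]; simpa using hcx
                rw [PySem.Dict.getD_of_not_contains d [] (by simpa using hcx)]
                have hFFbl : FF.getD bl [] = base ++ [bl] := by
                  rw [hstabf2 bl (by rw [hc2f bl]; simp), hf2, pvSetD_getD,
                    if_neg (Ne.symm hrtbl), hf1, pvSetD_getD, if_pos rfl, hfx, hbase_eq]
                  simp
                rw [hFFbl]
                rfl
            · rw [hd1, pvPutB_getD, if_neg hxbl]
              have hcx : d.contains x = true := by
                have h := hc2d x
                rw [hx] at h
                replace h := h.symm
                simp only [Bool.or_eq_true, beq_iff_eq] at h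
                rcases h with h1 | h1 | h1
                · exact absurd h1 hxrt
                · exact absurd h1 hxbl
                · exact h1
              exact hhead x hcx
      have := ih (l ++ [n]) f2 d2 (by rw [hsplit]; simp) hfold' hFF hg2 hinv2
      simp only [List.foldl_cons, hA, hB]
      exact this
    · have hq' : n.1 + n.2 ≥ gs := not_lt.mp hq
      have hA : pvStepA gs (some d) n = some d := by
        simp [pvStepA, get_adjacent_node_top_half, hq']
      have hB : pvOutStep FF gs d n = d := by simp [pvOutStep, hq]
      have hstep1 : pvFirstStep gs (some f) n = some f := by
        simp [pvFirstStep, hq]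
      have hfold' : (l ++ [n]).foldl (pvFirstStep gs) (some f0) = some f := by
        rw [List.foldl_append, hfold]
        simpa using hstep1
      have hg' : pvGoodF gs (l ++ [n]) f := by
        intro x
        rw [hg x, pvCreated_append]
        constructor
        · exact Or.inl
        · rintro (h | ⟨hqn, _⟩)
          · exact h
          · omega
      simp only [List.foldl_cons, hA, hB]
      exact ih (l ++ [n]) f d (by rw [hsplit]; simp) hfold' hFF hg' ⟨hceq, hhead⟩

lemma pvFoldAppendId (l acc : List (Int × Int)) :
    l.foldl (fun a n => a ++ [n]) acc = acc ++ l := by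
  induction l generalizing acc with
  | nil => simp
  | cons x xs ih => simp only [List.foldl_cons, ih]; simp

lemma pvFoldConcat (ls : List (List (Int × Int))) (acc : List (Int × Int)) :
    ls.foldl (fun a row => a ++ row) acc = acc ++ ls.flatten := by
  induction ls generalizing acc with
  | nil => simp
  | cons r rs ih => simp only [List.foldl_cons, ih]; simp

lemma pvGoodF0 (gs : Int) :
    pvGoodF gs [] (PySem.Dict.empty.insert ((0 : Int), (0 : Int)) [((0 : Int), (0 : Int))]) := by
  intro x
  rw [PySem.Dict.contains_insert]
  simp [PySem.Dict.contains_empty, pvCreated]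

-- ===== VERDICT (by name: the statement is the Claim_ definition above) =====
theorem node_path_dict_top_half_spec : Claim_equal_node_path_dict_top_half := by
  intro ght gs _hdom hpre
  unfold Spec_node_path_dict_top_half
  unfold node_path_dict_top_half node_path_dict_top_half_alt
  simp only [← List.foldl_flatten, pvFoldAppendId, pvFoldConcat, List.nil_append]
  set f0 : PySem.Dict (Int × Int) (List (Int × Int)) :=
    PySem.Dict.empty.insert ((0 : Int), (0 : Int)) [((0 : Int), (0 : Int))] with hf0
  set d0 : PySem.Dict (Int × Int) (List (List (Int × Int))) :=
    PySem.Dict.empty.insert ((0 : Int), (0 : Int)) [[((0 : Int), (0 : Int))]] with hd0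
  obtain ⟨FF, hFF, _, hstab0⟩ := pvRun1 ght gs hpre ght.flatten [] f0 (by simp)
    (by rw [hf0]; exact pvGoodF0 gs)
  have hc00 : f0.contains ((0 : Int), (0 : Int)) = true := by
    rw [hf0, PySem.Dict.contains_insert]; simp
  have hinv0 : pvInvD FF f0 d0 := by
    constructor
    · intro x
      simp [hf0, hd0, PySem.Dict.contains_insert]
    · intro x hx
      have hx0 : x = ((0 : Int), (0 : Int)) := by
        rw [hd0, PySem.Dict.contains_insert] at hx
        simpa [PySem.Dict.contains_empty, Prod.ext_iff] using hx
      subst hx0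
      rw [hd0, PySem.Dict.getD_insert, if_pos rfl,
        (hstab0 _ hc00).2, hf0, PySem.Dict.getD_insert, if_pos rfl]
      rfl
  have := pvLock ght gs hpre FF f0 ght.flatten [] f0 d0 (by simp) (by simp) hFF
    (by rw [hf0]; exact pvGoodF0 gs) hinv0
  rw [hFF, this]
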